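-- pv_equiv track=rewrite | github.com/chrichri17/advent-of-code | year_2023/11_cosmic_expansion/main.py | expand_galaxies
-- ===== SOURCE A (Python) =====
-- from bisect import bisect_left
--
-- def expand_galaxies(
--     galaxies: list[tuple[int, int]],
--     empty_rows: list[int],
--     empty_cols: list[int],
--     size: int,
-- ) -> list[tuple[int, int]]:
--     new_galaxies = []
--     for galaxy in galaxies:
--         # how many rows are empty before this galaxy
--         i = bisect_left(empty_rows, galaxy[0])
--         # how many cols are empty before this galaxy
--         j = bisect_left(empty_cols, galaxy[1])
--         new_galaxies.append((i * size + galaxy[0], j * size + galaxy[1]))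
--     return new_galaxies
-- ===== SOURCE B (Python) =====
-- def _insertion_point(a, x):
--     # recursive divide-and-conquer on slices; same value as bisect.bisect_left(a, x)
--     if not a:
--         return 0
--     mid = len(a) // 2
--     if a[mid] < x:
--         return mid + 1 + _insertion_point(a[mid + 1:], x)
--     return _insertion_point(a[:mid], x)
--
-- def expand_galaxies(
--     galaxies: list[tuple[int, int]],
--     empty_rows: list[int],
--     empty_cols: list[int],
--     size: int,
-- ) -> list[tuple[int, int]]:
--     return [
--         (_insertion_point(empty_rows, row) * size + row,
--          _insertion_point(empty_cols, col) * size + col)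
--         for row, col in galaxies
--     ]
-- ===== Notes on version B (the rewrite author's own statement) =====
-- stated objective: alternative
-- what changed: Replaces the library bisect_left (an index-based iterative binary search) with a recursive divide-and-conquer on list slices, and builds the result as a comprehension instead of an append loop; the insertion point is identical on every list, sorted or not.
import Mathlib
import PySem

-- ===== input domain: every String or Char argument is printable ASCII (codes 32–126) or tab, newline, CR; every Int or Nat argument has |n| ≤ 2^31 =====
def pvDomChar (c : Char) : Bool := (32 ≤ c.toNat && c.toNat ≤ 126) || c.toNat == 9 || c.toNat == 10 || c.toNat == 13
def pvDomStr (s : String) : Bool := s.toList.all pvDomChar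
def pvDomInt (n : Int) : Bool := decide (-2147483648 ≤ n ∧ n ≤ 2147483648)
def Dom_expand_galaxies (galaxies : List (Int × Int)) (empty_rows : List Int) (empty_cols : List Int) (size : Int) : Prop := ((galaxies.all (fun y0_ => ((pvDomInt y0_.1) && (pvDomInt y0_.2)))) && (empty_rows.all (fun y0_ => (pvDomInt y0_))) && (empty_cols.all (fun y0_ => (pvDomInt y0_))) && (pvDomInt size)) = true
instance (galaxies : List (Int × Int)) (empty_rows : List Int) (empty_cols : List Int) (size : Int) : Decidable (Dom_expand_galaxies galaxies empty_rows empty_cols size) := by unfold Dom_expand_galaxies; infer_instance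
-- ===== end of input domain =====

-- B replaces the library bisect_left (index-based iterative binary search) with a recursive
-- divide-and-conquer on list slices, and the append loop with a comprehension (objective: alternative).

-- ===== PORT A =====
-- literal port of CPython's bisect_left(a, x) with lo=0, hi=len(a)
def pyBisectLeft (a : List Int) (x : Int) (lo hi : Nat) : Nat :=
  if _h : lo < hi then
    let mid := (lo + hi) / 2
    if a.getD mid 0 < x then pyBisectLeft a x (mid + 1) hi
    else pyBisectLeft a x lo mid
  else lo
termination_by hi - lo
decreasing_by all_goals omega

def expand_galaxies (galaxies : List (Int × Int)) (empty_rows : List Int) (empty_cols : List Int) (size : Int) : List (Int × Int) :=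
  galaxies.foldl (fun new_galaxies galaxy =>
    let i := pyBisectLeft empty_rows galaxy.1 0 empty_rows.length
    let j := pyBisectLeft empty_cols galaxy.2 0 empty_cols.length
    new_galaxies ++ [((i : Int) * size + galaxy.1, (j : Int) * size + galaxy.2)]) []

-- ===== PORT B =====
-- recursive divide-and-conquer on slices; a[mid+1:] = drop (mid+1), a[:mid] = take mid (mid in range)
def insertionPoint (a : List Int) (x : Int) : Nat :=
  if _h : a = [] then 0
  else
    let mid := a.length / 2
    if a.getD mid 0 < x then mid + 1 + insertionPoint (a.drop (mid + 1)) x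
    else insertionPoint (a.take mid) x
termination_by a.length
decreasing_by
  · have : a.length ≠ 0 := fun h0 => _h (List.eq_nil_of_length_eq_zero h0)
    simp only [List.length_drop]; omega
  · have : a.length ≠ 0 := fun h0 => _h (List.eq_nil_of_length_eq_zero h0)
    simp only [List.length_take]; omega

def expand_galaxies_alt (galaxies : List (Int × Int)) (empty_rows : List Int) (empty_cols : List Int) (size : Int) : List (Int × Int) :=
  galaxies.map (fun g =>
    ((insertionPoint empty_rows g.1 : Int) * size + g.1,
     (insertionPoint empty_cols g.2 : Int) * size + g.2))

-- ===== PRECONDITION & SPEC =====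
def Spec_expand_galaxies (galaxies : List (Int × Int)) (empty_rows : List Int) (empty_cols : List Int) (size : Int) (out : List (Int × Int)) : Prop := out = expand_galaxies_alt galaxies empty_rows empty_cols size
instance (galaxies : List (Int × Int)) (empty_rows : List Int) (empty_cols : List Int) (size : Int) (out : List (Int × Int)) : Decidable (Spec_expand_galaxies galaxies empty_rows empty_cols size out) := by unfold Spec_expand_galaxies; infer_instance

-- ===== CLAIM (what is proved, stated in full; the proofs are below) =====
def Claim_equal_expand_galaxies : Prop := ∀ (galaxies : List (Int × Int)) (empty_rows : List Int) (empty_cols : List Int) (size : Int), Dom_expand_galaxies galaxies empty_rows empty_cols size → Spec_expand_galaxies galaxies empty_rows empty_cols size (expand_galaxies galaxies empty_rows empty_cols size)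

-- ===== LEMMAS AND PROOFS =====

theorem slice_getD (a : List Int) (lo hi k : Nat) (h : lo + k < hi) :
    ((a.take hi).drop lo).getD k 0 = a.getD (lo + k) 0 := by
  rw [List.getD_eq_getElem?_getD, List.getD_eq_getElem?_getD, List.getElem?_drop,
    List.getElem?_take_of_lt h, ]

theorem slice_length (a : List Int) (lo hi : Nat) (hhi : hi ≤ a.length) :
    ((a.take hi).drop lo).length = hi - lo := by
  simp [List.length_drop, List.length_take]; omega

theorem slice_drop (a : List Int) (lo hi m : Nat) :
    ((a.take hi).drop lo).drop m = (a.take hi).drop (lo + m) := by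
  rw [List.drop_drop]

theorem slice_take (a : List Int) (lo hi m : Nat) (h : lo + m ≤ hi) :
    ((a.take hi).drop lo).take m = (a.take (lo + m)).drop lo := by
  rw [List.take_drop, List.take_take, Nat.min_eq_left h]

-- the index-based binary search on [lo, hi) equals lo + the slice recursion on a[lo:hi]
theorem pyBisectLeft_eq_slice (a : List Int) (x : Int) :
    ∀ n lo hi, hi - lo ≤ n → hi ≤ a.length →
      pyBisectLeft a x lo hi = lo + insertionPoint ((a.take hi).drop lo) x := by
  intro n
  induction n with
  | zero =>
    intro lo hi hn hhi
    have hs : ((a.take hi).drop lo) = [] :=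
      List.eq_nil_of_length_eq_zero (by rw [slice_length a lo hi hhi]; omega)
    rw [pyBisectLeft, hs, insertionPoint]
    simp
    omega
  | succ n ih =>
    intro lo hi hn hhi
    by_cases hlt : lo < hi
    · set s := (a.take hi).drop lo with hsdef
      have hslen : s.length = hi - lo := slice_length a lo hi hhi
      have hsne : s ≠ [] := fun h0 => by rw [h0] at hslen; simp at hslen; omega
      have hmid : (lo + hi) / 2 = lo + s.length / 2 := by rw [hslen]; omega
      have hmidlt : lo + s.length / 2 < hi := by omega
      have hget : s.getD (s.length / 2) 0 = a.getD (lo + s.length / 2) 0 :=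
        slice_getD a lo hi _ hmidlt
      rw [pyBisectLeft, insertionPoint]
      simp only [hlt, dite_true, hsne, dite_false]
      rw [hmid, ← hget]
      by_cases hc : s.getD (s.length / 2) 0 < x
      · simp only [hc, if_true]
        rw [ih (lo + s.length / 2 + 1) hi (by omega) hhi]
        have hdd : s.drop (s.length / 2 + 1) = (a.take hi).drop (lo + s.length / 2 + 1) := by
          rw [hsdef, slice_drop a lo hi]
          congr 1
        rw [hdd]
        omega
      · simp only [hc, if_false]
        rw [ih lo (lo + s.length / 2) (by omega) (by omega)]
        have htt : s.take (s.length / 2) = (a.take (lo + s.length / 2)).drop lo := by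
          have hL := slice_length a lo hi hhi
          rw [hsdef]
          exact slice_take a lo hi _ (by omega)
        rw [htt]
    · have hs : ((a.take hi).drop lo) = [] :=
        List.eq_nil_of_length_eq_zero (by rw [slice_length a lo hi hhi]; omega)
      rw [pyBisectLeft, hs, insertionPoint]
      simp [hlt]

theorem pyBisectLeft_eq_insertionPoint (a : List Int) (x : Int) :
    pyBisectLeft a x 0 a.length = insertionPoint a x := by
  rw [pyBisectLeft_eq_slice a x a.length 0 a.length (by omega) (le_refl _)]
  simp

-- foldl-with-append builds the same list as map
theorem foldl_append_singleton {α β : Type} (f : α → β) :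
    ∀ (l : List α) (acc : List β),
      l.foldl (fun a g => a ++ [f g]) acc = acc ++ l.map f := by
  intro l
  induction l with
  | nil => intro acc; simp
  | cons h t ih => intro acc; simp [ih]

-- ===== VERDICT (by name: the statement is the Claim_ definition above) =====
theorem expand_galaxies_spec : Claim_equal_expand_galaxies := by
  intro galaxies empty_rows empty_cols size _hdom
  unfold Spec_expand_galaxies expand_galaxies expand_galaxies_alt
  rw [foldl_append_singleton]
  rw [List.nil_append]
  apply List.map_congr_left
  intro g _
  rw [pyBisectLeft_eq_insertionPoint empty_rows g.1,
      pyBisectLeft_eq_insertionPoint empty_cols g.2]
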